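-- pv_equiv track=rewrite | github.com/qiqi-xingyi/Quantum_Protein_Folding | protein_folding/qubit_utils/qubit_number_reducer.py | _calc_reduced_pauli_tables
-- ===== SOURCE A (Python) =====
-- from typing import Union, List, Dict, Tuple
--
-- def _calc_reduced_pauli_tables(
--     num_qubits: int, table_x, table_z, unused_qubits: List[int]
-- ) -> Tuple[List[bool], List[bool]]:
--     new_table_z = []
--     new_table_x = []
--     for ind in range(num_qubits):
--         if ind not in unused_qubits:
--             new_table_z.append(table_z[ind])
--             new_table_x.append(table_x[ind])
--
--     return new_table_z, new_table_x
-- ===== SOURCE B (Python) =====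
-- def _calc_reduced_pauli_tables(num_qubits, table_x, table_z, unused_qubits):
--     # Gap-based slicing: sort the excluded indices, then concatenate the
--     # contiguous slices of the tables between consecutive excluded indices.
--     cuts = sorted({i for i in unused_qubits if 0 <= i < num_qubits})
--     end = max(num_qubits, 0)
--     new_table_z = []
--     new_table_x = []
--     start = 0
--     for c in cuts:
--         new_table_z += table_z[start:c]
--         new_table_x += table_x[start:c]
--         start = c + 1
--     new_table_z += table_z[start:end]
--     new_table_x += table_x[start:end]
--     return new_table_z, new_table_x
-- ===== Notes on version B (the rewrite author's own statement) =====
-- stated objective: faster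
-- what changed: B sorts the deduplicated excluded indices and builds each output as a concatenation of contiguous table slices between consecutive excluded indices, instead of scanning every index with a per-iteration list-membership test and per-element indexing.
import Mathlib
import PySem

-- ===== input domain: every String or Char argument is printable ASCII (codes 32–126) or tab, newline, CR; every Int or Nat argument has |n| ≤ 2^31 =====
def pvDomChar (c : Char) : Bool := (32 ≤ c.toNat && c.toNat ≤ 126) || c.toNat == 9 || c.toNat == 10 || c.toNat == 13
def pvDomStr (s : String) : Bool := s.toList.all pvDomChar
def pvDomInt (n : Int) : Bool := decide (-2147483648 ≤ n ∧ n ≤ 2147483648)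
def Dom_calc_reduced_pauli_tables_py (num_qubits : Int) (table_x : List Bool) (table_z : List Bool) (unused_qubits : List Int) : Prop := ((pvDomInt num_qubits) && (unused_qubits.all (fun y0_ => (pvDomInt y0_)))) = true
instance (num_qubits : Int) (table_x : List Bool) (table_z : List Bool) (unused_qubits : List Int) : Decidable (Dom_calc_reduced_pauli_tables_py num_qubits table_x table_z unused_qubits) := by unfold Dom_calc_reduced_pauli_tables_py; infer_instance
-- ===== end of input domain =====

-- B sorts the deduplicated excluded indices and concatenates the contiguous table slices
-- between consecutive excluded indices; objective: faster (slice concatenation removes the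
-- per-index membership scan; measured faster in a timing run).

-- ===== PORT A =====
def calc_reduced_pauli_tables_py (num_qubits : Int) (table_x : List Bool) (table_z : List Bool) (unused_qubits : List Int) : List Bool × List Bool :=
  (PySem.List.pyRange 0 num_qubits 1).foldl
    (fun acc ind =>
      if ind ∉ unused_qubits then
        match PySem.List.pyGet? table_z ind, PySem.List.pyGet? table_x ind with
        | some z, some x => (acc.1 ++ [z], acc.2 ++ [x])
        | _, _ => acc   -- IndexError in Python; these inputs are excluded by Pre_
      else acc)
    ([], [])

-- ===== PORT B =====
def calc_reduced_pauli_tables_py_alt (num_qubits : Int) (table_x : List Bool) (table_z : List Bool) (unused_qubits : List Int) : List Bool × List Bool :=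
  let cuts := PySem.List.sorted (PySem.Set.ofList (unused_qubits.filter (fun i => decide (0 ≤ i ∧ i < num_qubits)))) (fun x => x) false
  let «end» : Int := max num_qubits 0
  let r := cuts.foldl
    (fun st c =>
      (st.1 ++ PySem.List.slice table_z (some st.2.2) (some c),
       st.2.1 ++ PySem.List.slice table_x (some st.2.2) (some c),
       c + 1))
    ([], [], 0)
  (r.1 ++ PySem.List.slice table_z (some r.2.2) (some «end»),
   r.2.1 ++ PySem.List.slice table_x (some r.2.2) (some «end»))

-- ===== PRECONDITION & SPEC =====
-- Pre_ excludes exactly the inputs where A raises IndexError: a kept index (in range(num_qubits),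
-- not in unused_qubits) that is out of range for table_z or table_x.
-- Stated as a cardinality so it is checkable without enumerating range(num_qubits).
def Pre_calc_reduced_pauli_tables_py (num_qubits : Int) (table_x : List Bool) (table_z : List Bool) (unused_qubits : List Int) : Prop :=
  let m : Int := min num_qubits ((min table_z.length table_x.length : Nat) : Int)
  ((PySem.Set.ofList unused_qubits).filter
      (fun i => decide (m ≤ i ∧ i < num_qubits))).length = (num_qubits - m).toNat
instance (num_qubits : Int) (table_x : List Bool) (table_z : List Bool) (unused_qubits : List Int) : Decidable (Pre_calc_reduced_pauli_tables_py num_qubits table_x table_z unused_qubits) := by unfold Pre_calc_reduced_pauli_tables_py; infer_instance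
def pvWitness_calc_reduced_pauli_tables_py : Int × List Bool × List Bool × List Int := (3, [true, false, true], [false, true, true], [1])

def Spec_calc_reduced_pauli_tables_py (num_qubits : Int) (table_x : List Bool) (table_z : List Bool) (unused_qubits : List Int) (out : List Bool × List Bool) : Prop := out = calc_reduced_pauli_tables_py_alt num_qubits table_x table_z unused_qubits
instance (num_qubits : Int) (table_x : List Bool) (table_z : List Bool) (unused_qubits : List Int) (out : List Bool × List Bool) : Decidable (Spec_calc_reduced_pauli_tables_py num_qubits table_x table_z unused_qubits out) := by unfold Spec_calc_reduced_pauli_tables_py; infer_instance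

-- ===== CLAIM (what is proved, stated in full; the proofs are below) =====
def Claim_equal_calc_reduced_pauli_tables_py : Prop := ∀ (num_qubits : Int) (table_x : List Bool) (table_z : List Bool) (unused_qubits : List Int), Dom_calc_reduced_pauli_tables_py num_qubits table_x table_z unused_qubits → Pre_calc_reduced_pauli_tables_py num_qubits table_x table_z unused_qubits → Spec_calc_reduced_pauli_tables_py num_qubits table_x table_z unused_qubits (calc_reduced_pauli_tables_py num_qubits table_x table_z unused_qubits)
-- ===== LEMMAS AND PROOFS =====

theorem pre_iff (num_qubits : Int) (table_x : List Bool) (table_z : List Bool) (unused_qubits : List Int) :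
    Pre_calc_reduced_pauli_tables_py num_qubits table_x table_z unused_qubits ↔
      ∀ i ∈ PySem.List.pyRange 0 num_qubits 1, i ∉ unused_qubits →
        i < (table_z.length : Int) ∧ i < (table_x.length : Int) := by
  unfold Pre_calc_reduced_pauli_tables_py
  dsimp only
  set m : Int := min num_qubits ((min table_z.length table_x.length : Nat) : Int) with hmdef
  set S : List Int := (PySem.Set.ofList unused_qubits).filter
      (fun i => decide (m ≤ i ∧ i < num_qubits)) with hSdef
  have hnd : S.Nodup := (PySem.Set.nodup_ofList unused_qubits).filter _
  have hsub : S.toFinset ⊆ Finset.Ico m num_qubits := by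
    intro x hx
    rw [List.mem_toFinset, hSdef, List.mem_filter] at hx
    simp only [decide_eq_true_eq] at hx
    rw [Finset.mem_Ico]
    exact hx.2
  constructor
  · intro h i hi hnu
    rw [PySem.List.mem_pyRange_one] at hi
    by_cases hlt : i < m
    · constructor <;> omega
    · exfalso
      have hcard : (Finset.Ico m num_qubits).card ≤ S.toFinset.card := by
        rw [List.toFinset_card_of_nodup hnd, Int.card_Ico, h]
      have heq := Finset.eq_of_subset_of_card_le hsub hcard
      have : i ∈ S.toFinset := by
        rw [heq, Finset.mem_Ico]; omega
      rw [List.mem_toFinset, hSdef, List.mem_filter] at this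
      exact hnu ((PySem.Set.mem_ofList unused_qubits i).mp this.1)
  · intro h
    have heq : S.toFinset = Finset.Ico m num_qubits := by
      apply Finset.Subset.antisymm hsub
      intro j hj
      rw [Finset.mem_Ico] at hj
      have hju : j ∈ unused_qubits := by
        by_contra hnu
        have := h j (by rw [PySem.List.mem_pyRange_one]; omega) hnu
        omega
      rw [List.mem_toFinset, hSdef, List.mem_filter]
      refine ⟨(PySem.Set.mem_ofList unused_qubits j).mpr hju, by simp; omega⟩
    have := List.toFinset_card_of_nodup hnd
    rw [heq, Int.card_Ico] at this
    omega

-- a clamped drop/take slice of an everywhere-in-range block is the map of getD over its indices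
theorem take_drop_map (t : List Bool) (a b : Nat) (h : ∀ k, a ≤ k → k < b → k < t.length) :
    (t.drop a).take (b - a) = (List.range (b - a)).map (fun k => t.getD (a + k) false) := by
  by_cases hba : b ≤ a
  · simp [Nat.sub_eq_zero_of_le hba]
  · have hb : b ≤ t.length := by have := h (b - 1) (by omega) (by omega); omega
    apply List.ext_getElem
    · simp [List.length_take, List.length_drop]; omega
    · intro k h1 h2
      simp only [List.length_map, List.length_range] at h2
      simp only [List.getElem_take, List.getElem_drop, List.getElem_map, List.getElem_range]
      rw [List.getD_eq_getElem t false (by omega)]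

theorem slice_eq_map (t : List Bool) (a b : Int) (ha : 0 ≤ a) (hab : a ≤ b)
    (h : ∀ i : Int, a ≤ i → i < b → i.toNat < t.length) :
    PySem.List.slice t (some a) (some b) =
      (PySem.List.pyRange a b 1).map (fun i => t.getD i.toNat false) := by
  rw [PySem.List.slice_toNat t ha (by omega), PySem.List.pyRange_one, List.map_map]
  have hfun : ((fun i : Int => t.getD i.toNat false) ∘ fun k : Nat => a + (k : Int))
      = fun k : Nat => t.getD (a.toNat + k) false := by
    funext k
    simp only [Function.comp]
    congr 1
    omega
  rw [hfun]
  have hba : (b - a).toNat = b.toNat - a.toNat := by omega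
  rw [hba]
  exact take_drop_map t a.toNat b.toNat (fun k hk1 hk2 => h (k : Int) (by omega) (by omega))

-- the B loop: slicing between sorted cuts produces the kept elements
theorem bloop (table_z table_x : List Bool) (n : Int) :
    ∀ (cuts : List Int) (za xa : List Bool) (s : Int),
      0 ≤ s →
      cuts.Pairwise (fun a b => a < b) →
      (∀ c ∈ cuts, s ≤ c ∧ c < n) →
      (∀ i : Int, s ≤ i → i < n → i ∉ cuts → i.toNat < table_z.length ∧ i.toNat < table_x.length) →
      (let r := cuts.foldl
          (fun st c =>
            (st.1 ++ PySem.List.slice table_z (some st.2.2) (some c),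
             st.2.1 ++ PySem.List.slice table_x (some st.2.2) (some c),
             c + 1)) (za, xa, s);
        ((r.1 ++ PySem.List.slice table_z (some r.2.2) (some (max n 0)),
          r.2.1 ++ PySem.List.slice table_x (some r.2.2) (some (max n 0))) : List Bool × List Bool))
      = (za ++ ((PySem.List.pyRange s n 1).filter (fun i => !decide (i ∈ cuts))).map (fun i => table_z.getD i.toNat false),
         xa ++ ((PySem.List.pyRange s n 1).filter (fun i => !decide (i ∈ cuts))).map (fun i => table_x.getD i.toNat false)) := by
  intro cuts
  induction cuts with
  | nil =>
    intro za xa s hs _ _ hin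
    simp only [List.foldl_nil, List.not_mem_nil, decide_false, Bool.not_false, List.filter_true]
    by_cases hns : n ≤ s
    · have hr : PySem.List.pyRange s n 1 = [] := PySem.List.pyRange_one_eq_nil hns
      rw [hr]
      rw [PySem.List.slice_toNat table_z hs (by omega), PySem.List.slice_toNat table_x hs (by omega)]
      have h0 : (max n 0).toNat - s.toNat = 0 := by omega
      simp [h0]
    · have hmax : max n 0 = n := by omega
      rw [hmax, slice_eq_map table_z s n hs (by omega) (fun i h1 h2 => (hin i h1 h2 (by simp)).1),
          slice_eq_map table_x s n hs (by omega) (fun i h1 h2 => (hin i h1 h2 (by simp)).2)]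
  | cons c rest ih =>
    intro za xa s hs hpw hbd hin
    have hcb := hbd c (by simp)
    have hrest_gt : ∀ d ∈ rest, c < d := fun d hd => (List.pairwise_cons.mp hpw).1 d hd
    simp only [List.foldl_cons]
    have hslz : PySem.List.slice table_z (some s) (some c) =
        (PySem.List.pyRange s c 1).map (fun i => table_z.getD i.toNat false) := by
      apply slice_eq_map table_z s c hs hcb.1
      intro i h1 h2
      exact (hin i h1 (by omega) (by
        simp only [List.mem_cons]
        rintro (rfl | hm)
        · omega
        · exact absurd (hrest_gt i hm) (by omega))).1
    have hslx : PySem.List.slice table_x (some s) (some c) =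
        (PySem.List.pyRange s c 1).map (fun i => table_x.getD i.toNat false) := by
      apply slice_eq_map table_x s c hs hcb.1
      intro i h1 h2
      exact (hin i h1 (by omega) (by
        simp only [List.mem_cons]
        rintro (rfl | hm)
        · omega
        · exact absurd (hrest_gt i hm) (by omega))).2
    have hih := ih (za ++ PySem.List.slice table_z (some s) (some c))
        (xa ++ PySem.List.slice table_x (some s) (some c)) (c + 1)
        (by omega) (List.pairwise_cons.mp hpw).2
        (fun d hd => ⟨by have := hrest_gt d hd; omega, (hbd d (by simp [hd])).2⟩)
        (fun i h1 h2 hm => hin i (by omega) h2 (by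
          simp only [List.mem_cons]
          rintro (rfl | hmm)
          · omega
          · exact hm hmm))
    rw [hih]
    -- split the kept range at c+1
    have hsplit : PySem.List.pyRange s n 1 =
        PySem.List.pyRange s (c + 1) 1 ++ PySem.List.pyRange (c + 1) n 1 :=
      PySem.List.pyRange_one_append s (c + 1) n (by omega) (by omega)
    rw [hsplit, List.filter_append, List.map_append, List.map_append]
    have hfirst : (PySem.List.pyRange s (c + 1) 1).filter (fun i => !decide (i ∈ c :: rest)) =
        PySem.List.pyRange s c 1 := by
      rw [PySem.List.pyRange_one_succ_right hcb.1, List.filter_append]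
      have hc : (([c] : List Int)).filter (fun i => !decide (i ∈ c :: rest)) = [] := by simp
      rw [hc, List.append_nil]
      apply List.filter_eq_self.mpr
      intro i hi
      rw [PySem.List.mem_pyRange_one] at hi
      simp only [List.mem_cons, Bool.not_eq_eq_eq_not, Bool.not_true, decide_eq_false_iff_not,
        not_or]
      exact ⟨by omega, fun hm => absurd (hrest_gt i hm) (by omega)⟩
    have hsecond : (PySem.List.pyRange (c + 1) n 1).filter (fun i => !decide (i ∈ c :: rest)) =
        (PySem.List.pyRange (c + 1) n 1).filter (fun i => !decide (i ∈ rest)) := by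
      apply List.filter_congr
      intro i hi
      rw [PySem.List.mem_pyRange_one] at hi
      simp only [List.mem_cons]
      have : i ≠ c := by omega
      simp [this]
    rw [hfirst, hsecond, hslz, hslx]
    simp [List.append_assoc]

-- ===== VERDICT (by name: the statement is the Claim_ definition above) =====
theorem calc_reduced_pauli_tables_py_spec : Claim_equal_calc_reduced_pauli_tables_py := by
  intro n tx tz u _ hpre
  rw [pre_iff] at hpre
  unfold Spec_calc_reduced_pauli_tables_py calc_reduced_pauli_tables_py calc_reduced_pauli_tables_py_alt
  dsimp only
  -- A's footprint: filtered range, per-index getD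
  have hcong : ∀ (acc : List Bool × List Bool), ∀ i ∈ PySem.List.pyRange 0 n 1,
      (if i ∉ u then
        match PySem.List.pyGet? tz i, PySem.List.pyGet? tx i with
        | some z, some x => (acc.1 ++ [z], acc.2 ++ [x])
        | _, _ => acc
      else acc)
      = ((if i ∉ u then acc.1 ++ [tz.getD i.toNat false] else acc.1),
         (if i ∉ u then acc.2 ++ [tx.getD i.toNat false] else acc.2)) := by
    intro acc i hi
    by_cases hm : i ∈ u
    · simp [hm]
    · rcases hpre i hi hm with ⟨h1, h2⟩
      rw [PySem.List.mem_pyRange_one] at hi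
      obtain ⟨k, rfl⟩ : ∃ k : Nat, i = (k : Int) := ⟨i.toNat, by omega⟩
      have h1' : k < tz.length := by omega
      have h2' : k < tx.length := by omega
      simp only [PySem.List.pyGet?_natCast, List.getElem?_eq_getElem h1', List.getElem?_eq_getElem h2']
      simp [hm, List.getD, List.getElem?_eq_getElem h1', List.getElem?_eq_getElem h2']
  rw [PySem.List.foldl_congr_mem _ _ _ _ hcong]
  rw [PySem.List.foldl_prod_mk
        (f := fun a i => if i ∉ u then a ++ [tz.getD i.toNat false] else a)
        (g := fun a i => if i ∉ u then a ++ [tx.getD i.toNat false] else a)]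
  rw [PySem.List.foldl_append_ite (p := fun i => i ∉ u) (f := fun i => tz.getD i.toNat false),
      PySem.List.foldl_append_ite (p := fun i => i ∉ u) (f := fun i => tx.getD i.toNat false)]
  -- B's footprint via bloop
  set cuts := PySem.List.sorted (PySem.Set.ofList (u.filter (fun i => decide (0 ≤ i ∧ i < n)))) (fun x => x) false with hcuts
  have hmem : ∀ i : Int, i ∈ cuts ↔ (i ∈ u ∧ 0 ≤ i ∧ i < n) := by
    intro i
    rw [hcuts, PySem.List.mem_sorted, PySem.Set.mem_ofList, List.mem_filter]
    simp
  have hB := bloop tz tx n cuts [] [] 0 (by omega)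
      (PySem.List.sorted_ofList_pairwise_lt _)
      (fun c hc => by have := (hmem c).mp hc; exact ⟨this.2.1, this.2.2⟩)
      (fun i h1 h2 hm => by
        have hiu : i ∉ u := fun hu => hm ((hmem i).mpr ⟨hu, h1, h2⟩)
        rcases hpre i (by rw [PySem.List.mem_pyRange_one]; omega) hiu with ⟨p1, p2⟩
        exact ⟨by omega, by omega⟩)
  rw [hB]
  have hfilt : (PySem.List.pyRange 0 n 1).filter (fun i => !decide (i ∈ cuts)) =
      (PySem.List.pyRange 0 n 1).filter (fun i => decide (i ∉ u)) := by
    apply List.filter_congr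
    intro i hi
    rw [PySem.List.mem_pyRange_one] at hi
    by_cases hu : i ∈ u
    · have : i ∈ cuts := (hmem i).mpr ⟨hu, hi.1, hi.2⟩
      simp [this, hu]
    · have : i ∉ cuts := fun hc => hu ((hmem i).mp hc).1
      simp [this, hu]
  rw [hfilt]
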